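-- pv_equiv track=rewrite | github.com/Kyoung-yeon99/Jump_to_Algorithm | Jump_to_Algorithm2/week26/SeoyeonHong/이모티콘할인행사.py | solution
-- ===== SOURCE A (Python) =====
-- from itertools import product
--
-- def solution(users, emoticons):
--     rate = [10, 20, 30, 40]
--     discounts = list(product(rate, repeat=len(emoticons)))
--     max_user = 0
--     max_purchase = 0
--     for i in range(len(discounts)): # 각 할인률 조합에 대해
--         service_user = 0 # 서비스 가입한 사용자 수
--         total_purchase = 0 # 총 판매액
--
--         for j in range(len(users)): # 각 사용자에 대해
--             purchase = 0 # 총 구매액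
--
--             for k in range(len(emoticons)): # 각 아이템에 대해
--                 if discounts[i][k] >= users[j][0]: # 일정 비율 이상 할인한다면 구매
--                     purchase += emoticons[k] * (100 - discounts[i][k]) // 100
--
--             if purchase >= users[j][1]: # 구매 비용의 합이 일정 가격 이상일 경우 서비스 가입
--                 service_user += 1
--             else: # 서비스에 가입하지 않았을 경우 판매액 합산
--                 total_purchase += purchase
--
--         if service_user > max_user:
--             max_user = service_user
--             max_purchase = total_purchase
--         elif service_user == max_user:
--             max_purchase = max(max_purchase, total_purchase)
--
--     return ([max_user, max_purchase]) # 이모티콘 플러스 서비스 가입 수, 이모티콘 매출액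
-- ===== SOURCE B (Python) =====
-- def solution(users, emoticons):
--     # DFS over emoticon indices, threading per-user accumulated purchase totals
--     # down the recursion instead of re-scanning all emoticons at every combination.
--     n = len(emoticons)
--     best = [0, 0]
--
--     def dfs(k, totals):
--         if k == n:
--             service_user = 0
--             total_purchase = 0
--             for t, (_, threshold) in zip(totals, users):
--                 if t >= threshold:
--                     service_user += 1
--                 else:
--                     total_purchase += t
--             if service_user > best[0]:
--                 best[0], best[1] = service_user, total_purchase
--             elif service_user == best[0] and total_purchase > best[1]:
--                 best[1] = total_purchase
--             return
--         for rate in (10, 20, 30, 40):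
--             price = emoticons[k] * (100 - rate) // 100
--             dfs(k + 1, [t + price if rate >= r else t for t, (r, _) in zip(totals, users)])
--
--     dfs(0, [0] * len(users))
--     return best
-- ===== Notes on version B (the rewrite author's own statement) =====
-- stated objective: faster
-- what changed: Replaces the itertools.product table plus triple nested loop (re-scanning every user and every emoticon for each rate combination) by a DFS over emoticon indices that threads per-user partial purchase totals down the recursion, so each leaf only scans the users once.
import Mathlib
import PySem

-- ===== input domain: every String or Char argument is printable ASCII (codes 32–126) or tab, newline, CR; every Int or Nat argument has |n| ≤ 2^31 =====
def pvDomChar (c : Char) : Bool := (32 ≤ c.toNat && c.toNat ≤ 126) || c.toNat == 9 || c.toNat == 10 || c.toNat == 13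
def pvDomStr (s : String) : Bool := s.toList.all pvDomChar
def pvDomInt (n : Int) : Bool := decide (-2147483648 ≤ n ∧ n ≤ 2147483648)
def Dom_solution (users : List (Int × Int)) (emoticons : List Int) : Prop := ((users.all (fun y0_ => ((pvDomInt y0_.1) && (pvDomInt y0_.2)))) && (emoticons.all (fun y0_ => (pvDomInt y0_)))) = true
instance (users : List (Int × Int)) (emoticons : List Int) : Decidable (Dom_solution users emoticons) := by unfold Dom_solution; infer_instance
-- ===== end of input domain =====

-- B replaces the exhaustive product-of-rates table (re-scanning every user × emoticon at each
-- combination) by a DFS over emoticon indices that threads per-user partial totals down the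
-- recursion, so each leaf only scans the users once; objective: faster by a factor of len(emoticons).

-- ===== PORT A =====
-- itertools.product([10,20,30,40], repeat=n), leftmost position varying slowest
def prodN : Nat → List (List Int)
  | 0 => [[]]
  | n + 1 => ([10, 20, 30, 40] : List Int).flatMap (fun r => (prodN n).map (r :: ·))

-- inner k-loop: purchase accumulated over (discounts[i][k], emoticons[k]) pairs
def innerA (d es : List Int) (r : Int) : Int :=
  (d.zip es).foldl
    (fun purchase dk =>
      if dk.1 ≥ r then purchase + PySem.Int.floordiv (dk.2 * (100 - dk.1)) 100 else purchase) 0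

-- middle j-loop: (service_user, total_purchase) for one discount combination
def leafA (users : List (Int × Int)) (es d : List Int) : Int × Int :=
  users.foldl
    (fun st u =>
      let purchase := innerA d es u.1
      if purchase ≥ u.2 then (st.1 + 1, st.2) else (st.1, st.2 + purchase)) (0, 0)

def solution (users : List (Int × Int)) (emoticons : List Int) : List Int :=
  let res := (prodN emoticons.length).foldl
    (fun mb d =>
      let st := leafA users emoticons d
      if st.1 > mb.1 then (st.1, st.2)
      else if st.1 = mb.1 then (mb.1, max mb.2 st.2)
      else mb) ((0 : Int), (0 : Int))
  [res.1, res.2]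

-- ===== PORT B =====
-- leaf: count subscribers / sum revenue from the accumulated per-user totals
def leafB (users : List (Int × Int)) (totals : List Int) : Int × Int :=
  (totals.zip users).foldl
    (fun st tu => if tu.1 ≥ tu.2.2 then (st.1 + 1, st.2) else (st.1, st.2 + tu.1)) (0, 0)

-- best-update with A's tie-break: strictly more subscribers wins, ties keep max revenue
def updB (best st : Int × Int) : Int × Int :=
  if st.1 > best.1 then st
  else if st.1 = best.1 ∧ st.2 > best.2 then (best.1, st.2)
  else best

-- DFS over the remaining emoticons, threading per-user partial totals
def dfsB (users : List (Int × Int)) : List Int → List Int → Int × Int → Int × Int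
  | [], totals, best => updB best (leafB users totals)
  | e :: rest, totals, best =>
      ([10, 20, 30, 40] : List Int).foldl
        (fun b rate =>
          dfsB users rest
            ((totals.zip users).map (fun tu =>
              if rate ≥ tu.2.1 then tu.1 + PySem.Int.floordiv (e * (100 - rate)) 100 else tu.1))
            b) best

def solution_alt (users : List (Int × Int)) (emoticons : List Int) : List Int :=
  let res := dfsB users emoticons (users.map (fun _ => (0 : Int))) (0, 0)
  [res.1, res.2]

-- ===== PRECONDITION & SPEC =====
def Spec_solution (users : List (Int × Int)) (emoticons : List Int) (out : List Int) : Prop := out = solution_alt users emoticons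
instance (users : List (Int × Int)) (emoticons : List Int) (out : List Int) : Decidable (Spec_solution users emoticons out) := by unfold Spec_solution; infer_instance

-- ===== CLAIM (what is proved, stated in full; the proofs are below) =====
def Claim_equal_solution : Prop := ∀ (users : List (Int × Int)) (emoticons : List Int), Dom_solution users emoticons → Spec_solution users emoticons (solution users emoticons)

-- ===== LEMMAS AND PROOFS =====

-- recursive form of the inner purchase sum
def innerF (r : Int) : List (Int × Int) → Int
  | [] => 0
  | p :: l => (if p.1 ≥ r then PySem.Int.floordiv (p.2 * (100 - p.1)) 100 else 0) + innerF r l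

theorem innerA_foldl (r : Int) : ∀ (l : List (Int × Int)) (a : Int),
    l.foldl (fun purchase dk =>
      if dk.1 ≥ r then purchase + PySem.Int.floordiv (dk.2 * (100 - dk.1)) 100 else purchase) a
      = a + innerF r l := by
  intro l
  induction l with
  | nil => intro a; simp [innerF]
  | cons p l ih =>
      intro a
      simp only [List.foldl_cons, innerF, ih]
      split <;> ring

theorem innerA_eq (d es : List Int) (r : Int) : innerA d es r = innerF r (d.zip es) := by
  unfold innerA
  rw [innerA_foldl]
  exact zero_add _

-- what the DFS adds to the carried totals, combination by combination
def addT (users : List (Int × Int)) : List Int → List Int → List Int → List Int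
  | totals, [], _ => totals
  | totals, _ :: _, [] => totals
  | totals, e :: es, r :: d =>
      addT users
        ((totals.zip users).map (fun tu =>
          if r ≥ tu.2.1 then tu.1 + PySem.Int.floordiv (e * (100 - r)) 100 else tu.1)) es d

theorem map_fst_zip_len {α β : Type} : ∀ (a : List α) (b : List β), a.length = b.length →
    (a.zip b).map Prod.fst = a := by
  intro a
  induction a with
  | nil => intro b _; simp
  | cons x xs ih =>
      intro b hb
      cases b with
      | nil => simp at hb
      | cons y ys => simp [ih ys (by simpa using hb)]

theorem zip_users_map_zip (users : List (Int × Int)) (g : Int × (Int × Int) → Int) :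
    ∀ (totals : List Int),
      ((totals.zip users).map g).zip users = (totals.zip users).map (fun x => (g x, x.2)) := by
  induction users with
  | nil => intro totals; simp
  | cons u us ih =>
      intro totals
      cases totals with
      | nil => simp
      | cons t ts => simp [ih ts]

theorem map_zip_self {α β : Type} (f : α → β) : ∀ (l : List α),
    (l.map f).zip l = l.map (fun x => (f x, x)) := by
  intro l
  induction l with
  | nil => simp
  | cons x xs ih => simp [ih]

theorem addT_closed (users : List (Int × Int)) :
    ∀ (es d totals : List Int), d.length = es.length → totals.length = users.length →
      addT users totals es d = (totals.zip users).map (fun tu => tu.1 + innerF tu.2.1 (d.zip es)) := by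
  intro es
  induction es with
  | nil =>
      intro d totals hd ht
      cases d with
      | nil =>
          simp only [addT, List.zip_nil_left, innerF]
          rw [show (fun (tu : Int × (Int × Int)) => tu.1 + (0:Int)) = Prod.fst by funext tu; ring]
          exact (map_fst_zip_len totals users ht).symm
      | cons r d => simp at hd
  | cons e es ih =>
      intro d totals hd ht
      cases d with
      | nil => simp at hd
      | cons r d =>
          simp only [addT]
          rw [ih d _ (by simpa using hd) (by simp [ht])]
          rw [zip_users_map_zip]
          rw [List.map_map]
          apply List.map_congr_left
          intro x _
          simp only [Function.comp, List.zip_cons_cons, innerF]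
          split <;> ring

theorem prodN_mem_length : ∀ (n : Nat) (d : List Int), d ∈ prodN n → d.length = n := by
  intro n
  induction n with
  | zero => intro d hd; simp [prodN] at hd; simp [hd]
  | succ n ih =>
      intro d hd
      simp only [prodN, List.mem_flatMap, List.mem_map] at hd
      obtain ⟨r, _, t, ht, rfl⟩ := hd
      simp [ih t ht]

-- the DFS equals a foldl of best-updates over the full product of rate combinations
theorem dfsB_eq (users : List (Int × Int)) :
    ∀ (es : List Int) (totals : List Int) (best : Int × Int),
      dfsB users es totals best
        = (prodN es.length).foldl (fun b d => updB b (leafB users (addT users totals es d))) best := by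
  intro es
  induction es with
  | nil => intro totals best; simp [dfsB, prodN, addT]
  | cons e es ih =>
      intro totals best
      simp only [dfsB, List.length_cons, prodN, List.foldl_flatMap, List.foldl_map]
      apply PySem.List.foldl_congr_mem
      intro b r _
      rw [ih]
      apply PySem.List.foldl_congr_mem
      intro b' d _
      rfl

-- A's best-update step equals B's updB
theorem upd_eq (mb st : Int × Int) :
    (if st.1 > mb.1 then (st.1, st.2)
     else if st.1 = mb.1 then (mb.1, max mb.2 st.2)
     else mb) = updB mb st := by
  obtain ⟨a, b⟩ := mb
  obtain ⟨c, d⟩ := st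
  simp only [updB, max_def]
  split_ifs <;> simp_all <;> omega

-- at a full combination, A's per-user leaf equals B's leaf on the accumulated totals
theorem leaf_eq (users : List (Int × Int)) (es d : List Int) (hd : d.length = es.length) :
    leafB users (addT users (users.map (fun _ => (0 : Int))) es d) = leafA users es d := by
  rw [addT_closed users es d _ hd (by simp)]
  rw [map_zip_self (fun _ => (0 : Int)) users, List.map_map]
  unfold leafB leafA
  rw [map_zip_self, List.foldl_map]
  apply PySem.List.foldl_congr_mem
  intro st u _
  simp [Function.comp, innerA_eq]

-- ===== VERDICT (by name: the statement is the Claim_ definition above) =====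
theorem solution_spec : Claim_equal_solution := by
  intro users emoticons _
  unfold Spec_solution solution solution_alt
  rw [dfsB_eq]
  have h := PySem.List.foldl_congr_mem (prodN emoticons.length)
    (fun mb d =>
      let st := leafA users emoticons d
      if st.1 > mb.1 then (st.1, st.2)
      else if st.1 = mb.1 then (mb.1, max mb.2 st.2)
      else mb)
    (fun b d => updB b (leafB users (addT users (users.map (fun _ => (0 : Int))) emoticons d)))
    ((0 : Int), (0 : Int))
    (fun mb d hd => by
      simp only []
      rw [leaf_eq users emoticons d (prodN_mem_length _ d hd), upd_eq])
  simp only [h]
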